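-- pv_equiv track=rewrite | github.com/manoj-bayer01/breeding-eds-dii-semantic-utility-document | utility.py | strip_outer_quotes
-- ===== SOURCE A (Python) =====
-- def strip_outer_quotes(s: str) -> str:
--     """
--     Remove any balanced wrapping single or double quotes around a string, repeatedly.
--     Preserves backticks and inner content.
--     Example: '''`table`''' -> `table`, "'text'" -> text
--     """
--     if s is None:
--         return s
--     s = s.strip()
--     if not s:
--         return s
--     # Repeatedly strip matching leading/trailing single or double quotes
--     while len(s) >= 2 and (s[0] == s[-1]) and s[0] in ("'", '"'):
--         s = s[1:-1].strip()
--     return s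
-- ===== SOURCE B (Python) =====
-- def strip_outer_quotes(s: str) -> str:
--     if s is None:
--         return s
--     s = s.strip()
--     i, k = 0, len(s)
--     while k - i >= 2 and s[i] == s[k - 1] and s[i] in ("'", '"'):
--         i += 1
--         k -= 1
--         while i < k and s[i].isspace():
--             i += 1
--         while i < k and s[k - 1].isspace():
--             k -= 1
--     return s[i:k]
-- ===== Notes on version B (the rewrite author's own statement) =====
-- stated objective: alternative
-- what changed: B replaces A's loop of repeated s[1:-1] slicing plus re-strip (each unquoting layer copies the remaining string) by a single two-pointer inward scan over the original string with whitespace-skip inner loops and one final slice.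
import Mathlib
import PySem

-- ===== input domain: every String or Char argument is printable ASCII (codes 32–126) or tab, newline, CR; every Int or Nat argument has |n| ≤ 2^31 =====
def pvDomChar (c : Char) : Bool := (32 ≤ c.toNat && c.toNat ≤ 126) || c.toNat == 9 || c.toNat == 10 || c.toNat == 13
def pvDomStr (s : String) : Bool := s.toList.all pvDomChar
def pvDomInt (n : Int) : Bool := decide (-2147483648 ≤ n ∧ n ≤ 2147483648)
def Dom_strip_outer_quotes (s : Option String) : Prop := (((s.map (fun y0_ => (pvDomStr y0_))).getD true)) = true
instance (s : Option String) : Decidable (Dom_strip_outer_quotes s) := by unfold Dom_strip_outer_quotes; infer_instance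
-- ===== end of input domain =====

-- B replaces A's repeated `s = s[1:-1].strip()` slicing loop by a single two-pointer
-- inward scan over the original string with one final slice (alternative algorithm;
-- avoids per-layer copying, though no speed difference was measured on generated inputs).

-- ===== PORT A =====

-- length bound for A's loop body, needed for A's termination (cited in decreasing_by)
theorem pvAStep_len (cs : List Char) (h2 : 2 ≤ cs.length) :
    (PySem.Chars.strip (PySem.List.slice cs (some 1) (some (-1)))).length < cs.length := by
  have hs : PySem.List.slice cs (some 1) (some (-1)) = (cs.drop 1).take (cs.length - 2) := by
    simp only [PySem.List.slice, PySem.List.clampIdx]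
    have : ¬ ((1 : Int) < 0) := by norm_num
    rw [if_neg this]
    rw [if_pos (by norm_num : (-1 : Int) < 0)]
    rw [if_neg (by omega : ¬ ((cs.length : Int) + (-1) < 0))]
    have h1 : min (1 : Int).toNat cs.length = 1 := by omega
    have h2' : ((cs.length : Int) + (-1)).toNat = cs.length - 1 := by omega
    rw [h1, h2']
    have h3 : cs.length - 1 - 1 = cs.length - 2 := by omega
    rw [h3]
  have hls : (PySem.Chars.strip ((cs.drop 1).take (cs.length - 2))).length
      ≤ ((cs.drop 1).take (cs.length - 2)).length := by
    simp only [PySem.Chars.strip, PySem.Chars.rstrip, PySem.Chars.lstrip]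
    calc (List.dropWhile PySem.Chars.isspace
            ((List.dropWhile PySem.Chars.isspace ((cs.drop 1).take (cs.length - 2))).reverse)).reverse.length
        ≤ (List.dropWhile PySem.Chars.isspace ((cs.drop 1).take (cs.length - 2))).reverse.length := by
          rw [List.length_reverse]; exact List.length_dropWhile_le _ _
      _ ≤ _ := by rw [List.length_reverse]; exact List.length_dropWhile_le _ _
  have hlen : ((cs.drop 1).take (cs.length - 2)).length ≤ cs.length - 2 := by
    simp [List.length_take]
  rw [hs]
  omega

def pvALoop (cs : List Char) : List Char :=
  if h : 2 ≤ cs.length ∧ PySem.List.pyGet? cs 0 = PySem.List.pyGet? cs (-1) ∧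
      (PySem.List.pyGet? cs 0 = some '\'' ∨ PySem.List.pyGet? cs 0 = some '"') then
    pvALoop (PySem.Chars.strip (PySem.List.slice cs (some 1) (some (-1))))
  else cs
termination_by cs.length
decreasing_by exact pvAStep_len cs h.1

def strip_outer_quotes (s : Option String) : Option String :=
  match s with
  | none => none
  | some str =>
    let cs := PySem.Chars.strip str.toList
    if cs.length = 0 then some (String.ofList cs)
    else some (String.ofList (pvALoop cs))

-- ===== PORT B =====

-- `s[i].isspace()` at a Nat index (in-range visits only; none outside)
def pvWsAt (cs : List Char) (i : Nat) : Bool :=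
  match cs[i]? with
  | some c => PySem.Chars.isspace c
  | none => false

-- `while i < k and s[i].isspace(): i += 1`
def pvSkipF (cs : List Char) (k i : Nat) : Nat :=
  if i < k ∧ pvWsAt cs i then pvSkipF cs k (i + 1) else i
termination_by k - i
decreasing_by omega

-- `while i < k and s[k-1].isspace(): k -= 1`
def pvSkipB (cs : List Char) (i k : Nat) : Nat :=
  if i < k ∧ pvWsAt cs (k - 1) then pvSkipB cs i (k - 1) else k
termination_by k
decreasing_by omega

-- bounds cited in pvBLoop's decreasing_by
theorem pvSkipF_ge (cs : List Char) (k i : Nat) : i ≤ pvSkipF cs k i := by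
  fun_induction pvSkipF cs k i with
  | case1 i h' ih => omega
  | case2 i h' => omega

theorem pvSkipB_le (cs : List Char) (i k : Nat) : pvSkipB cs i k ≤ k := by
  fun_induction pvSkipB cs i k with
  | case1 k h' ih => omega
  | case2 k h' => omega

def pvBLoop (cs : List Char) (i k : Nat) : Nat × Nat :=
  if h : i + 2 ≤ k ∧ cs[i]? = cs[k - 1]? ∧ (cs[i]? = some '\'' ∨ cs[i]? = some '"') then
    let i' := pvSkipF cs (k - 1) (i + 1)
    pvBLoop cs i' (pvSkipB cs i' (k - 1))
  else (i, k)
termination_by k - i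
decreasing_by
  have h1 : i + 1 ≤ pvSkipF cs (k - 1) (i + 1) := pvSkipF_ge cs (k - 1) (i + 1)
  have h2 : pvSkipB cs (pvSkipF cs (k - 1) (i + 1)) (k - 1) ≤ k - 1 :=
    pvSkipB_le cs (pvSkipF cs (k - 1) (i + 1)) (k - 1)
  omega

def strip_outer_quotes_alt (s : Option String) : Option String :=
  match s with
  | none => none
  | some str =>
    let cs := PySem.Chars.strip str.toList
    let p := pvBLoop cs 0 cs.length
    some (String.ofList (PySem.List.slice cs (some (p.1 : Int)) (some (p.2 : Int))))

-- ===== PRECONDITION & SPEC =====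
def Spec_strip_outer_quotes (s : Option String) (out : Option String) : Prop := out = strip_outer_quotes_alt s
instance (s : Option String) (out : Option String) : Decidable (Spec_strip_outer_quotes s out) := by unfold Spec_strip_outer_quotes; infer_instance

-- ===== CLAIM (what is proved, stated in full; the proofs are below) =====
def Claim_equal_strip_outer_quotes : Prop := ∀ (s : Option String), Dom_strip_outer_quotes s → Spec_strip_outer_quotes s (strip_outer_quotes s)

-- ===== LEMMAS AND PROOFS =====

theorem pvSkipF_le (cs : List Char) (k i : Nat) (h : i ≤ k) : pvSkipF cs k i ≤ k := by
  fun_induction pvSkipF cs k i with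
  | case1 i h' ih => exact ih (by omega)
  | case2 i h' => exact h

theorem pvSkipB_ge (cs : List Char) (i k : Nat) (h : i ≤ k) : i ≤ pvSkipB cs i k := by
  fun_induction pvSkipB cs i k with
  | case1 k h' ih => exact ih (by omega)
  | case2 k h' => exact h


theorem pvPyGet_zero (l : List Char) : PySem.List.pyGet? l 0 = l[0]? := by
  cases l with
  | nil => simp [PySem.List.pyGet?, PySem.List.pyIdx?]
  | cons a t => simp [PySem.List.pyGet?, PySem.List.pyIdx?]

theorem pvPyGet_neg_one (l : List Char) (h : 1 ≤ l.length) :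
    PySem.List.pyGet? l (-1) = l[l.length - 1]? := by
  simp only [PySem.List.pyGet?, PySem.List.pyIdx?]
  rw [if_neg (by norm_num), if_pos (by omega)]
  simp

theorem pvSlice_one_neg_one (l : List Char) (h2 : 2 ≤ l.length) :
    PySem.List.slice l (some 1) (some (-1)) = (l.drop 1).take (l.length - 2) := by
  simp only [PySem.List.slice, PySem.List.clampIdx]
  rw [if_neg (by norm_num : ¬ ((1 : Int) < 0))]
  rw [if_pos (by norm_num : (-1 : Int) < 0)]
  rw [if_neg (by omega : ¬ ((l.length : Int) + (-1) < 0))]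
  have h1 : min (1 : Int).toNat l.length = 1 := by omega
  have h2' : ((l.length : Int) + (-1)).toNat = l.length - 1 := by omega
  rw [h1, h2']
  have h3 : l.length - 1 - 1 = l.length - 2 := by omega
  rw [h3]

theorem pvSeg_cons (cs : List Char) (i k : Nat) (hik : i < k) (hk : k ≤ cs.length) :
    (cs.drop i).take (k - i) = cs[i]'(by omega) :: (cs.drop (i + 1)).take (k - (i + 1)) := by
  rw [List.drop_eq_getElem_cons (by omega)]
  rw [show k - i = (k - (i+1)) + 1 by omega, List.take_succ_cons]

theorem pvRstrip_snoc (l : List Char) (c : Char) :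
    PySem.Chars.rstrip (l ++ [c])
      = if PySem.Chars.isspace c then PySem.Chars.rstrip l else l ++ [c] := by
  simp only [PySem.Chars.rstrip, List.reverse_append, List.reverse_cons, List.reverse_nil,
    List.nil_append, List.cons_append, List.dropWhile_cons]
  split_ifs with h
  · rfl
  · simp

theorem pvSeg_snoc (cs : List Char) (i k : Nat) (hik : i < k) (hk : k ≤ cs.length) :
    (cs.drop i).take (k - i)
      = (cs.drop i).take (k - 1 - i) ++ [cs[k - 1]'(by omega)] := by
  rw [show k - i = (k - 1 - i) + 1 by omega, List.take_add_one]
  have : (cs.drop i)[k - 1 - i]? = some (cs[k - 1]'(by omega)) := by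
    rw [List.getElem?_drop, show i + (k - 1 - i) = k - 1 by omega]
    exact List.getElem?_eq_getElem (by omega)
  rw [this]
  rfl

theorem pvSkipF_dropWhile (cs : List Char) (k i : Nat) (hk : k ≤ cs.length) :
    List.dropWhile PySem.Chars.isspace ((cs.drop i).take (k - i))
      = (cs.drop (pvSkipF cs k i)).take (k - pvSkipF cs k i) := by
  fun_induction pvSkipF cs k i with
  | case1 i h ih =>
    obtain ⟨hik, hws⟩ := h
    have hget : cs[i]? = some (cs[i]'(by omega)) := List.getElem?_eq_getElem (by omega)
    have hsp : PySem.Chars.isspace (cs[i]'(by omega)) = true := by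
      unfold pvWsAt at hws; rw [hget] at hws; exact hws
    rw [pvSeg_cons cs i k hik hk, List.dropWhile_cons, if_pos hsp]
    exact ih
  | case2 i h =>
    by_cases hik : i < k
    · have hws : pvWsAt cs i = false := by
        by_contra hc
        exact h ⟨hik, by revert hc; cases (pvWsAt cs i) <;> simp⟩
      have hget : cs[i]? = some (cs[i]'(by omega)) := List.getElem?_eq_getElem (by omega)
      have hsp : PySem.Chars.isspace (cs[i]'(by omega)) = false := by
        unfold pvWsAt at hws; rw [hget] at hws; exact hws
      rw [pvSeg_cons cs i k hik hk, List.dropWhile_cons, if_neg (by simp [hsp])]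
    · rw [show k - i = 0 by omega]
      simp

theorem pvSkipB_rstrip (cs : List Char) (i k : Nat) (hik : i ≤ k) (hk : k ≤ cs.length) :
    PySem.Chars.rstrip ((cs.drop i).take (k - i))
      = (cs.drop i).take (pvSkipB cs i k - i) := by
  fun_induction pvSkipB cs i k with
  | case1 k h ih =>
    obtain ⟨hik', hws⟩ := h
    have hsp : PySem.Chars.isspace (cs[k - 1]'(by omega)) = true := by
      unfold pvWsAt at hws
      rw [List.getElem?_eq_getElem (by omega : k - 1 < cs.length)] at hws
      exact hws
    rw [pvSeg_snoc cs i k hik' hk, pvRstrip_snoc, if_pos hsp]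
    exact ih (by omega) (by omega)
  | case2 k h =>
    by_cases hik' : i < k
    · have hws : pvWsAt cs (k - 1) = false := by
        by_contra hc
        exact h ⟨hik', by revert hc; cases (pvWsAt cs (k - 1)) <;> simp⟩
      have hsp : PySem.Chars.isspace (cs[k - 1]'(by omega)) = false := by
        unfold pvWsAt at hws
        rw [List.getElem?_eq_getElem (by omega : k - 1 < cs.length)] at hws
        exact hws
      rw [pvSeg_snoc cs i k hik' hk, pvRstrip_snoc, if_neg (by simp [hsp])]
    · rw [show k - i = 0 by omega]
      simp [PySem.Chars.rstrip]

theorem pvStrip_seg (cs : List Char) (i k : Nat) (hik : i ≤ k) (hk : k ≤ cs.length) :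
    PySem.Chars.strip ((cs.drop i).take (k - i))
      = (cs.drop (pvSkipF cs k i)).take (pvSkipB cs (pvSkipF cs k i) k - pvSkipF cs k i) := by
  have hle : pvSkipF cs k i ≤ k := pvSkipF_le cs k i hik
  simp only [PySem.Chars.strip, PySem.Chars.lstrip]
  rw [pvSkipF_dropWhile cs k i hk, pvSkipB_rstrip cs (pvSkipF cs k i) k hle hk]

theorem pvMain (cs : List Char) (i k : Nat) (hik : i ≤ k) (hk : k ≤ cs.length) :
    pvALoop ((cs.drop i).take (k - i))
      = (cs.drop (pvBLoop cs i k).1).take ((pvBLoop cs i k).2 - (pvBLoop cs i k).1) := by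
  fun_induction pvBLoop cs i k with
  | case1 i k h i' ih =>
    obtain ⟨h2, heq, hq⟩ := h
    have hlen : ((cs.drop i).take (k - i)).length = k - i := by
      simp [List.length_take]; omega
    have hget0 : PySem.List.pyGet? ((cs.drop i).take (k - i)) 0 = cs[i]? := by
      rw [pvPyGet_zero, List.getElem?_take_of_lt (by omega), List.getElem?_drop]
      rfl
    have hgetl : PySem.List.pyGet? ((cs.drop i).take (k - i)) (-1) = cs[k - 1]? := by
      rw [pvPyGet_neg_one _ (by omega), hlen,
        List.getElem?_take_of_lt (by omega), List.getElem?_drop,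
        show i + (k - i - 1) = k - 1 by omega]
    rw [pvALoop]
    rw [dif_pos (by
      refine ⟨by omega, ?_, ?_⟩
      · rw [hget0, hgetl]; exact heq
      · rw [hget0]; exact hq)]
    have harg : PySem.Chars.strip (PySem.List.slice ((cs.drop i).take (k - i)) (some 1) (some (-1)))
        = (cs.drop i').take (pvSkipB cs i' (k - 1) - i') := by
      rw [pvSlice_one_neg_one _ (by omega), hlen]
      have hseg : ((cs.drop i).take (k - i)).drop 1 = (cs.drop (i + 1)).take (k - i - 1) := by
        rw [List.drop_take, List.drop_drop]
      rw [hseg, List.take_take, show min (k - i - 2) (k - i - 1) = (k - 1) - (i + 1) by omega]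
      exact pvStrip_seg cs (i + 1) (k - 1) (by omega) (by omega)
    rw [harg]
    exact ih (pvSkipB_ge cs i' (k - 1) (pvSkipF_le cs (k - 1) (i + 1) (by omega)))
      (by have := pvSkipB_le cs i' (k - 1); omega)
  | case2 i k h =>
    rw [pvALoop]
    rw [dif_neg (by
      intro ⟨h2, heq, hq⟩
      apply h
      have hlen : ((cs.drop i).take (k - i)).length = k - i := by
        simp [List.length_take]; omega
      rw [hlen] at h2
      have hget0 : PySem.List.pyGet? ((cs.drop i).take (k - i)) 0 = cs[i]? := by
        rw [pvPyGet_zero, List.getElem?_take_of_lt (by omega), List.getElem?_drop]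
        rfl
      have hgetl : PySem.List.pyGet? ((cs.drop i).take (k - i)) (-1) = cs[k - 1]? := by
        rw [pvPyGet_neg_one _ (by rw [hlen]; omega), hlen,
          List.getElem?_take_of_lt (by omega), List.getElem?_drop,
          show i + (k - i - 1) = k - 1 by omega]
      rw [hget0] at hq
      rw [hget0, hgetl] at heq
      exact ⟨by omega, heq, hq⟩)]


-- ===== VERDICT (by name: the statement is the Claim_ definition above) =====
theorem strip_outer_quotes_spec : Claim_equal_strip_outer_quotes := by
  intro s _
  unfold Spec_strip_outer_quotes strip_outer_quotes strip_outer_quotes_alt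
  match s with
  | none => rfl
  | some str =>
    simp only
    have hmain := pvMain (PySem.Chars.strip str.toList) 0 (PySem.Chars.strip str.toList).length
      (by omega) (by omega)
    simp only [List.drop_zero, Nat.sub_zero, List.take_length] at hmain
    rw [PySem.List.slice_natCast]
    by_cases hz : (PySem.Chars.strip str.toList).length = 0
    · have hnil : PySem.Chars.strip str.toList = [] := List.eq_nil_of_length_eq_zero hz
      rw [if_pos hz, hnil]
      rw [hnil] at hmain
      have hb : pvALoop ([] : List Char) = [] := by
        rw [pvALoop]
        simp
      rw [← hmain, hb]
    · rw [if_neg hz, hmain]
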